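-- pv_equiv track=rewrite | github.com/zounoogo/P300_task | trial_generator.py | _has_too_many_consecutive
-- ===== SOURCE A (Python) =====
-- from typing import List, Tuple
--
-- STANDARD = "standard"   # blue circle  → LSL marker 11
--
-- def _has_too_many_consecutive(
--     sequence: List[str],
--     max_consecutive_standards: int,
-- ) -> bool:
--     """
--     Return True if *sequence* contains more than
--     *max_consecutive_standards* standards in a row.
--     """
--     count = 0
--     for s in sequence:
--         if s == STANDARD:
--             count += 1
--             if count > max_consecutive_standards:
--                 return True
--         else:
--             count = 0
--     return False
-- ===== SOURCE B (Python) =====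
-- from typing import List
--
-- STANDARD = "standard"   # blue circle  → LSL marker 11
--
--
-- def _has_too_many_consecutive(
--     sequence: List[str],
--     max_consecutive_standards: int,
-- ) -> bool:
--     """
--     Return True if *sequence* contains more than
--     *max_consecutive_standards* standards in a row.
--
--     Sublist-search formulation: build the shortest forbidden window of
--     standards (length max(1, max_consecutive_standards + 1): at least one
--     actual standard is needed) and test whether it occurs as a contiguous
--     sublist of *sequence*.
--     """
--     k = max(1, max_consecutive_standards + 1)
--     if k > len(sequence):
--         return False
--     needle = [STANDARD] * k
--     return any(sequence[i:i + k] == needle for i in range(len(sequence) - k + 1))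
-- ===== Notes on version B (the rewrite author's own statement) =====
-- stated objective: alternative
-- what changed: Replaced the running counter-with-reset by a sublist search: build the forbidden window [STANDARD]*max(1, max_consecutive_standards+1) and test whether it occurs as a contiguous sublist of the sequence.
import Mathlib
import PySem

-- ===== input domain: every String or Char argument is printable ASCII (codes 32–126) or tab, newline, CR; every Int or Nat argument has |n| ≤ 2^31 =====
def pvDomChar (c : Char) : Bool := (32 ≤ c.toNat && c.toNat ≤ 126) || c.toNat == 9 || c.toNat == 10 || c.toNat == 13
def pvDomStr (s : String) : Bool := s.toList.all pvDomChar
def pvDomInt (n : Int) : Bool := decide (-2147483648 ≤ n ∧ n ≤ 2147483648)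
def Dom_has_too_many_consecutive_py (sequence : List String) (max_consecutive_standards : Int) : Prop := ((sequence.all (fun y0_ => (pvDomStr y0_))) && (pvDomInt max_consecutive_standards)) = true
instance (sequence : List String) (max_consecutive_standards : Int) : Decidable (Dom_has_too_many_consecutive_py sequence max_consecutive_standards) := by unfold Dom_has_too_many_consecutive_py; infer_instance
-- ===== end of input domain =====

-- B replaces A's running counter-with-reset by a sublist search for the forbidden window of
-- max(1, m+1) consecutive "standard"s (alternative algorithm, not claimed faster).


-- ===== PORT A =====
-- A's for-loop with the running `count` and the early `return True`, as structural recursion.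
def pvAGo : List String → Int → Int → Bool
  | [], _, _ => false
  | s :: rest, count, m =>
    if s == "standard" then
      let c := count + 1
      if c > m then true else pvAGo rest c m
    else pvAGo rest 0 m

def has_too_many_consecutive_py (sequence : List String) (max_consecutive_standards : Int) : Bool :=
  pvAGo sequence 0 max_consecutive_standards

-- ===== PORT B =====
-- Source B: k = max(1, m+1); early False if k > len; else any(sequence[i:i+k] == [STANDARD]*k
-- for i in range(len-k+1)).  The slice sequence[i:i+k] with 0 ≤ i and k ≥ 1 is exactly
-- (drop i).take k (Python slices truncate at the end, as take does).
def has_too_many_consecutive_py_alt (sequence : List String) (max_consecutive_standards : Int) : Bool :=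
  let k : Int := max 1 (max_consecutive_standards + 1)
  if k > (sequence.length : Int) then false
  else
    (List.range (sequence.length - k.toNat + 1)).any
      (fun i => (sequence.drop i).take k.toNat == List.replicate k.toNat "standard")

-- ===== PRECONDITION & SPEC =====
def Spec_has_too_many_consecutive_py (sequence : List String) (max_consecutive_standards : Int) (out : Bool) : Prop := out = has_too_many_consecutive_py_alt sequence max_consecutive_standards
instance (sequence : List String) (max_consecutive_standards : Int) (out : Bool) : Decidable (Spec_has_too_many_consecutive_py sequence max_consecutive_standards out) := by unfold Spec_has_too_many_consecutive_py; infer_instance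

-- ===== CLAIM (what is proved, stated in full; the proofs are below) =====
def Claim_equal_has_too_many_consecutive_py : Prop := ∀ (sequence : List String) (max_consecutive_standards : Int), Dom_has_too_many_consecutive_py sequence max_consecutive_standards → Spec_has_too_many_consecutive_py sequence max_consecutive_standards (has_too_many_consecutive_py sequence max_consecutive_standards)

-- ===== LEMMAS AND PROOFS =====

-- If a run of r ≥ 1 standards starts the list and it pushes the count past m, A returns true.
theorem pvAGo_of_run_prefix : ∀ (r : Nat) (seq : List String) (c m : Int),
    1 ≤ r → List.replicate r "standard" <+: seq → m < c + r → pvAGo seq c m = true := by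
  intro r
  induction r with
  | zero => intro _ _ _ h; omega
  | succ r' ih =>
    intro seq c m _ hp hm
    obtain ⟨t, ht⟩ := hp
    subst ht
    rw [List.replicate_succ, List.cons_append, pvAGo]
    simp only [beq_self_eq_true, if_true]
    split_ifs with h1
    · rfl
    · have hr' : 1 ≤ r' := by push_cast at hm; omega
      exact ih _ (c + 1) m hr' ⟨t, rfl⟩ (by push_cast at hm ⊢; omega)

-- If A returns true, either an initial run already pushes c past m, or a full forbidden
-- window of kn = (max 1 (m+1)).toNat standards occurs somewhere.
theorem pvAGo_true_cases (m : Int) : ∀ (seq : List String) (c : Int), 0 ≤ c →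
    pvAGo seq c m = true →
    (∃ j : Nat, 1 ≤ j ∧ m < c + j ∧ List.replicate j "standard" <+: seq) ∨
    (∃ i : Nat, List.replicate (max 1 (m + 1)).toNat "standard" <+: seq.drop i) := by
  intro seq
  induction seq with
  | nil => intro c _ h; simp [pvAGo] at h
  | cons s rest ih =>
    intro c hc h
    by_cases hs : s = "standard"
    · subst hs
      rw [pvAGo] at h
      simp only [beq_self_eq_true, if_true] at h
      split_ifs at h with h1
      · exact Or.inl ⟨1, le_refl _, by push_cast; omega, ⟨rest, rfl⟩⟩
      · rcases ih (c + 1) (by omega) h with ⟨j, hj1, hj2, t, ht⟩ | ⟨i, hw⟩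
        · exact Or.inl ⟨j + 1, by omega, by push_cast at hj2 ⊢; omega,
            ⟨t, by rw [List.replicate_succ, List.cons_append, ht]⟩⟩
        · exact Or.inr ⟨i + 1, by simpa using hw⟩
    · have hsb : (s == "standard") = false := by simp [hs]
      rw [pvAGo, hsb] at h
      simp only [Bool.false_eq_true, if_false] at h
      rcases ih 0 (le_refl _) h with ⟨j, hj1, hj2, hp⟩ | ⟨i, hw⟩
      · have hkj : (max 1 (m + 1)).toNat ≤ j := by omega
        refine Or.inr ⟨1, ?_⟩
        have hpp : List.replicate (max 1 (m + 1)).toNat "standard" <+: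
            List.replicate j "standard" := by
          exact ⟨List.replicate (j - (max 1 (m + 1)).toNat) "standard", by
            rw [← List.replicate_add]; congr 1; omega⟩
        simpa using hpp.trans hp
      · exact Or.inr ⟨i + 1, by simpa using hw⟩

-- Conversely, a forbidden window anywhere makes A return true (for any count c ≥ 0).
theorem pvAGo_of_window (m : Int) : ∀ (seq : List String) (i : Nat) (c : Int), 0 ≤ c →
    List.replicate (max 1 (m + 1)).toNat "standard" <+: seq.drop i → pvAGo seq c m = true := by
  intro seq
  induction seq with
  | nil =>
    intro i c _ hp
    rw [List.drop_nil] at hp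
    have := hp.length_le
    simp at this
  | cons s rest ih =>
    intro i c hc hp
    cases i with
    | zero =>
      rw [List.drop_zero] at hp
      exact pvAGo_of_run_prefix _ _ c m (by omega) hp (by omega)
    | succ i' =>
      rw [List.drop_succ_cons] at hp
      rw [pvAGo]
      by_cases hs : (s == "standard") = true
      · simp only [hs, if_true]
        split_ifs with h1
        · rfl
        · exact ih i' (c + 1) (by omega) hp
      · simp only [Bool.not_eq_true] at hs
        simp only [hs, Bool.false_eq_true, if_false]
        exact ih i' 0 (le_refl _) hp

theorem pvAGo_iff_window (seq : List String) (m : Int) :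
    pvAGo seq 0 m = true ↔
      ∃ i : Nat, List.replicate (max 1 (m + 1)).toNat "standard" <+: seq.drop i := by
  constructor
  · intro h
    rcases pvAGo_true_cases m seq 0 (le_refl _) h with ⟨j, hj1, hj2, hp⟩ | hw
    · refine ⟨0, ?_⟩
      have hkj : (max 1 (m + 1)).toNat ≤ j := by omega
      have hpp : List.replicate (max 1 (m + 1)).toNat "standard" <+:
          List.replicate j "standard" :=
        ⟨List.replicate (j - (max 1 (m + 1)).toNat) "standard", by
          rw [← List.replicate_add]; congr 1; omega⟩
      simpa using hpp.trans hp
    · exact hw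
  · rintro ⟨i, hw⟩
    exact pvAGo_of_window m seq i 0 (le_refl _) hw

-- ===== VERDICT (by name: the statement is the Claim_ definition above) =====
theorem has_too_many_consecutive_py_spec : Claim_equal_has_too_many_consecutive_py := by
  intro seq m _
  unfold Spec_has_too_many_consecutive_py has_too_many_consecutive_py
    has_too_many_consecutive_py_alt
  simp only []
  set kn : Nat := (max 1 (m + 1)).toNat with hkn
  have hkn1 : 1 ≤ kn := by omega
  split_ifs with hbig
  · -- window does not fit: A is false too
    cases hA : pvAGo seq 0 m
    · rfl
    · exfalso
      obtain ⟨i, hw⟩ := (pvAGo_iff_window seq m).mp hA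
      have hlen := hw.length_le
      simp only [List.length_replicate, List.length_drop] at hlen
      omega
  · -- window fits: A true ↔ some window of kn standards occurs at an admissible offset
    rw [Bool.eq_iff_iff, pvAGo_iff_window, List.any_eq_true]
    constructor
    · rintro ⟨i, hw⟩
      have hlen := hw.length_le
      simp only [List.length_replicate, List.length_drop] at hlen
      refine ⟨i, List.mem_range.mpr (by omega), ?_⟩
      have htake : List.replicate kn "standard" = (seq.drop i).take kn := by
        have := List.prefix_iff_eq_take.mp hw
        simpa using this
      simp [← htake]
    · rintro ⟨i, _, hb⟩
      have htake : (seq.drop i).take kn = List.replicate kn "standard" := by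
        simpa using hb
      exact ⟨i, htake ▸ List.take_prefix kn (seq.drop i)⟩
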